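-- pv_equiv track=rewrite | github.com/jeppeter/clibs | coutput.py | val_quote_string
-- ===== SOURCE A (Python) =====
-- def val_quote_string(s):
--     rets = ''
--     sb = 0
--     for c in s:
--         if c in [ '"']:
--             if sb :
--                 rets += c
--             else:
--                 rets += '\\'
--                 rets += c
--             sb = 0
--         elif c == '\\':
--             sb = 1
--             rets += '\\'
--             rets += '\\'
--         else:
--             sb = 0
--             rets += c
--     return rets
-- ===== SOURCE B (Python) =====
-- def val_quote_string(s):
--     out = []
--     i = 0
--     n = len(s)
--     while i < n:
--         c = s[i]
--         if c == '\\':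
--             out.append('\\\\')
--             if i + 1 < n and s[i + 1] == '"':
--                 out.append('"')
--                 i += 2
--             else:
--                 i += 1
--         elif c == '"':
--             out.append('\\"')
--             i += 1
--         else:
--             out.append(c)
--             i += 1
--     return ''.join(out)
-- ===== Notes on version B (the rewrite author's own statement) =====
-- stated objective: alternative
-- what changed: Replaces A's single-pass scan with a carried sb state flag by an index-based lookahead loop that consumes a backslash-quote pair in one step (appending the quote unescaped) and has no state variable.
import Mathlib
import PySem

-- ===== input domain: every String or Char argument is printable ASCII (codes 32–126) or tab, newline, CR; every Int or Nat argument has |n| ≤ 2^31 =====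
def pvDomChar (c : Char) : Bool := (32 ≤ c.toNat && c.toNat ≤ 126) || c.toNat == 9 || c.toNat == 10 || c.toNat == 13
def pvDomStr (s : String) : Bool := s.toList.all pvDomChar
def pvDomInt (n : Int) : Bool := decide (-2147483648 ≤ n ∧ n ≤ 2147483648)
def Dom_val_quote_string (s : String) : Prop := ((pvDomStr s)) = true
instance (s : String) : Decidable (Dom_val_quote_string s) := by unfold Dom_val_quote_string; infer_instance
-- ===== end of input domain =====

-- B replaces A's state-flag scan by an index/lookahead loop that consumes a backslash-quote pair at once (objective: simpler, no speed claim).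

-- ===== PORT A =====
-- A's loop step: state = (rets so far, sb flag); strings handled on the List Char side.
def pvAStep (st : List Char × Int) (c : Char) : List Char × Int :=
  if c = '"' then
    if st.2 ≠ 0 then (st.1 ++ [c], 0)
    else (st.1 ++ ['\\'] ++ [c], 0)
  else if c = '\\' then (st.1 ++ ['\\'] ++ ['\\'], 1)
  else (st.1 ++ [c], 0)

def val_quote_string (s : String) : String :=
  String.ofList (s.toList.foldl pvAStep ([], 0)).1

-- ===== PORT B =====
-- Source B's while loop over positions, transcribed as recursion on the remaining characters
-- (advance by 2 when a backslash is followed by a quote, else by 1).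
def pvBGo : List Char → List Char
  | [] => []
  | '\\' :: '"' :: r => '\\' :: '\\' :: '"' :: pvBGo r
  | '\\' :: rest => '\\' :: '\\' :: pvBGo rest
  | '"' :: rest => '\\' :: '"' :: pvBGo rest
  | c :: rest => c :: pvBGo rest

def val_quote_string_alt (s : String) : String :=
  String.ofList (pvBGo s.toList)

-- ===== PRECONDITION & SPEC =====
def Spec_val_quote_string (s : String) (out : String) : Prop := out = val_quote_string_alt s
instance (s : String) (out : String) : Decidable (Spec_val_quote_string s out) := by unfold Spec_val_quote_string; infer_instance

-- ===== CLAIM (what is proved, stated in full; the proofs are below) =====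
def Claim_equal_val_quote_string : Prop := ∀ (s : String), Dom_val_quote_string s → Spec_val_quote_string s (val_quote_string s)

-- ===== LEMMAS AND PROOFS =====

theorem pvAStep_quote0 (a : List Char) : pvAStep (a, 0) '"' = (a ++ ['\\', '"'], 0) := by
  simp [pvAStep]

theorem pvAStep_quote1 (a : List Char) : pvAStep (a, 1) '"' = (a ++ ['"'], 0) := by
  simp [pvAStep]

theorem pvAStep_bs (a : List Char) (sb : Int) : pvAStep (a, sb) '\\' = (a ++ ['\\', '\\'], 1) := by
  simp [pvAStep]

theorem pvAStep_other (a : List Char) (sb : Int) (c : Char) (h1 : c ≠ '"') (h2 : c ≠ '\\') :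
    pvAStep (a, sb) c = (a ++ [c], 0) := by
  simp [pvAStep, h1, h2]

theorem pvFold_eq (l : List Char) : ∀ acc : List Char,
    (l.foldl pvAStep (acc, 0)).1 = acc ++ pvBGo l := by
  induction l using pvBGo.induct with
  | case1 => intro acc; simp [pvBGo]
  | case2 r ih =>
    intro acc
    rw [show pvBGo ('\\' :: '"' :: r) = '\\' :: '\\' :: '"' :: pvBGo r from rfl]
    simp only [List.foldl, pvAStep_bs, pvAStep_quote1]
    rw [ih]; simp
  | case3 rest hne ih =>
    intro acc
    have hbgo : pvBGo ('\\' :: rest) = '\\' :: '\\' :: pvBGo rest := by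
      cases rest with
      | nil => rfl
      | cons c r =>
        have hc : c ≠ '"' := fun h => hne r (by rw [h])
        rw [pvBGo.eq_def]
        split <;> simp_all; (rename_i hb2 hq2 heq2; exact hb2 heq2.1.symm)
    rw [hbgo]
    simp only [List.foldl, pvAStep_bs]
    have h1 : (rest.foldl pvAStep (acc ++ ['\\', '\\'], 1)).1
        = (rest.foldl pvAStep (acc ++ ['\\', '\\'], 0)).1 := by
      cases rest with
      | nil => rfl
      | cons c r =>
        have hc : c ≠ '"' := fun h => hne r (by rw [h])
        by_cases hb : c = '\\'
        · subst hb; simp only [List.foldl, pvAStep_bs]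
        · simp only [List.foldl, pvAStep_other _ _ _ hc hb]
    rw [h1, ih]; simp
  | case4 rest ih =>
    intro acc
    rw [show pvBGo ('"' :: rest) = '\\' :: '"' :: pvBGo rest from rfl]
    simp only [List.foldl, pvAStep_quote0]
    rw [ih]; simp
  | case5 c rest h0 h1 h2 ih =>
    intro acc
    have hq : c ≠ '"' := fun h => h2 h
    have hb : c ≠ '\\' := fun h => h1 h
    have hbgo : pvBGo (c :: rest) = c :: pvBGo rest := by
      rw [pvBGo.eq_def]
      split <;> simp_all
    rw [hbgo]
    simp only [List.foldl, pvAStep_other _ _ _ hq hb]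
    rw [ih]; simp

-- ===== VERDICT (by name: the statement is the Claim_ definition above) =====
theorem val_quote_string_spec : Claim_equal_val_quote_string := by
  intro s _
  unfold Spec_val_quote_string val_quote_string val_quote_string_alt
  rw [pvFold_eq]
  simp
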